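-- pv_equiv track=rewrite | github.com/Diaboloss712/CodingTest | 프로그래머스/1/389478. 택배 상자 꺼내기/택배 상자 꺼내기.py | solution
-- ===== SOURCE A (Python) =====
-- def solution(n, w, num):
--     answer = 0
--     height = n//w
--     board = [[0] * w for _ in range(height+1)]
--     for i in range(height + 1):
--         for j in range(w):
--             if (i+1) % 2 == 0:
--                 board[i][j] = (i+1) * w - j
--             else:
--                 board[i][j] = i * w + (j+1)
--             if board[i][j] == num:
--                 x = j
--                 y = i
--     for i in range(height+1):
--         if board[i][x] >= num and board[i][x] <= n:
--             answer += 1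
--     return answer
-- ===== SOURCE B (Python) =====
-- def solution(n, w, num):
--     r, k = divmod(num - 1, w)
--     c = k if r % 2 == 0 else w - 1 - k
--     count = 0
--     for i in range(n // w + 1):
--         v = i * w + c + 1 if i % 2 == 0 else (i + 1) * w - c
--         if num <= v <= n:
--             count += 1
--     return count
-- ===== Notes on version B (the rewrite author's own statement) =====
-- stated objective: faster
-- what changed: B computes the column of num arithmetically via divmod and counts the boxes in that single column with a short loop of n//w+1 iterations, instead of materialising the whole n-cell snake board and searching it.
import Mathlib
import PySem

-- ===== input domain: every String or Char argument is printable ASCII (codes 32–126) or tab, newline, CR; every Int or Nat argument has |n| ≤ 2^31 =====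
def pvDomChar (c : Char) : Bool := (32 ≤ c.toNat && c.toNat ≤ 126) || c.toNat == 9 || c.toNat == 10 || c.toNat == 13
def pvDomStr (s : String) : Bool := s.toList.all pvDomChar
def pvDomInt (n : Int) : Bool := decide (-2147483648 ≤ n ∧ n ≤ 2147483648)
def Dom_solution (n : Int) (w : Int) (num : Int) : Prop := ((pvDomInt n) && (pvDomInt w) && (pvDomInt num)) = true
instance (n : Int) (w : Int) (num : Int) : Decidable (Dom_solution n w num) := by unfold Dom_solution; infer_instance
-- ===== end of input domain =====

-- B replaces A's full board construction and scan by an arithmetic column computation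
-- plus a single short column loop (objective: faster; the asymptotic change is O(n) → O(n/w)).

-- ===== PORT A =====
-- Literal port of A.  The board is a List (List Int); the pair (board, x/y) is the loop state,
-- the found coordinates (x, y) being an Option (none = Python's x/y unbound).  Indexing with
-- `[·]?.getD _` is exact here: every index the admitted inputs reach is in range (Python would
-- raise IndexError/NameError exactly on the inputs Pre_solution excludes; `none => 0` is the
-- case where x stays unbound but the second loop is empty, which is where A still returns 0).
def solution (n : Int) (w : Int) (num : Int) : Int :=
  let height := PySem.Int.floordiv n w
  let board0 : List (List Int) :=
    (PySem.List.pyRange 0 (height + 1) 1).map (fun _ => List.replicate w.toNat 0)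
  let st :=
    (PySem.List.pyRange 0 (height + 1) 1).foldl
      (fun (st : List (List Int) × Option (Int × Int)) i =>
        (PySem.List.pyRange 0 w 1).foldl
          (fun (st : List (List Int) × Option (Int × Int)) j =>
            let v : Int :=
              if PySem.Int.mod (i + 1) 2 = 0 then (i + 1) * w - j else i * w + (j + 1)
            let bd := st.1.set i.toNat ((st.1[i.toNat]?.getD []).set j.toNat v)
            let xy := if v = num then some (j, i) else st.2
            (bd, xy))
          st)
      (board0, none)
  match st.2 with
  | some (x, _) =>
      (PySem.List.pyRange 0 (height + 1) 1).foldl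
        (fun answer i =>
          let v := (st.1[i.toNat]?.getD [])[x.toNat]?.getD 0
          if v ≥ num ∧ v ≤ n then answer + 1 else answer)
        0
  | none => 0

-- ===== PORT B =====
def solution_alt (n : Int) (w : Int) (num : Int) : Int :=
  let r := PySem.Int.floordiv (num - 1) w
  let k := PySem.Int.mod (num - 1) w
  let c := if PySem.Int.mod r 2 = 0 then k else w - 1 - k
  (PySem.List.pyRange 0 (PySem.Int.floordiv n w + 1) 1).foldl
    (fun count i =>
      let v := if PySem.Int.mod i 2 = 0 then i * w + c + 1 else (i + 1) * w - c
      if num ≤ v ∧ v ≤ n then count + 1 else count)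
    0

-- ===== PRECONDITION & SPEC =====
-- Exactly the inputs on which A returns: w ≠ 0 (w = 0 is ZeroDivisionError), and either both
-- loops are empty (n//w + 1 ≤ 0, A returns 0 with x unbound) or w ≥ 1 and num is a value that
-- actually occurs on the board (otherwise x stays unbound and the second loop raises NameError).
def Pre_solution (n : Int) (w : Int) (num : Int) : Prop :=
  w ≠ 0 ∧ (PySem.Int.floordiv n w + 1 ≤ 0 ∨
    (1 ≤ w ∧ 1 ≤ num ∧ num ≤ (PySem.Int.floordiv n w + 1) * w))
instance (n : Int) (w : Int) (num : Int) : Decidable (Pre_solution n w num) := by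
  unfold Pre_solution; infer_instance

def pvWitness_solution : Int × Int × Int := (5, 3, 4)

def Spec_solution (n : Int) (w : Int) (num : Int) (out : Int) : Prop := out = solution_alt n w num
instance (n : Int) (w : Int) (num : Int) (out : Int) : Decidable (Spec_solution n w num out) := by
  unfold Spec_solution; infer_instance

-- ===== CLAIM (what is proved, stated in full; the proofs are below) =====
def Claim_equal_solution : Prop := ∀ (n : Int) (w : Int) (num : Int), Dom_solution n w num → Pre_solution n w num → Spec_solution n w num (solution n w num)

-- ===== LEMMAS AND PROOFS =====

-- the value A writes into board cell (i, j)
def rvA (w _num i j : Int) : Int :=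
  if PySem.Int.mod (i + 1) 2 = 0 then (i + 1) * w - j else i * w + (j + 1)

-- the two components of A's inner-loop step
def innerB (w _num i : Int) (bd : List (List Int)) (j : Int) : List (List Int) :=
  bd.set i.toNat ((bd[i.toNat]?.getD []).set j.toNat (rvA w _num i j))
def innerX (w num i : Int) (o : Option (Int × Int)) (j : Int) : Option (Int × Int) :=
  if rvA w num i j = num then some (j, i) else o

-- a cell value determines its coordinates (snake rows partition 1..(H+1)*w)
theorem cell_unique {w i r j k : Int} (hw : 0 < w) (hj : 0 ≤ j) (hj2 : j < w)
    (hk : 0 ≤ k) (hk2 : k < w) (h : i * w + j = r * w + k) : i = r ∧ j = k := by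
  have hir : i = r := by
    rcases lt_trichotomy i r with h1 | h1 | h1
    · exfalso; have : i + 1 ≤ r := h1; nlinarith [mul_le_mul_of_nonneg_right this hw.le]
    · exact h1
    · exfalso; have : r + 1 ≤ i := h1; nlinarith [mul_le_mul_of_nonneg_right this hw.le]
  subst hir; exact ⟨rfl, by linarith⟩

-- characterisation of rvA = num under the Pre_ bounds
theorem rvA_eq_num_iff {w num r k c : Int} (hw : 0 < w)
    (hnum : num = r * w + k + 1) (hk : 0 ≤ k) (hk2 : k < w)
    (hc : c = if PySem.Int.mod r 2 = 0 then k else w - 1 - k)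
    {i j : Int} (hj : 0 ≤ j) (hj2 : j < w) :
    (rvA w num i j = num ↔ i = r ∧ j = c) := by
  have h2 : (0:Int) < 2 := by norm_num
  rw [rvA, PySem.Int.mod_eq_emod_of_pos h2] at *
  by_cases hp : (i + 1) % 2 = 0
  · -- i odd: value (i+1)*w - j
    rw [if_pos hp]
    constructor
    · intro h
      have h' : i * w + (w - 1 - j) = r * w + k := by rw [hnum] at h; ring_nf; ring_nf at h; linarith
      obtain ⟨hir, hjk⟩ := cell_unique hw (by omega) (by omega) hk hk2 h'
      refine ⟨hir, ?_⟩
      have hrodd : r % 2 = 1 := by omega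
      rw [hc, if_neg (by omega)]; omega
    · rintro ⟨hir, hjc⟩
      subst hir
      have hrodd : i % 2 = 1 := by omega
      rw [hc, if_neg (by omega)] at hjc
      rw [hnum, hjc]; ring
  · -- i even: value i*w + (j+1)
    rw [if_neg hp]
    constructor
    · intro h
      have h' : i * w + j = r * w + k := by rw [hnum] at h; linarith
      obtain ⟨hir, hjk⟩ := cell_unique hw hj hj2 hk hk2 h'
      refine ⟨hir, ?_⟩
      have hreven : r % 2 = 0 := by omega
      rw [hc, if_pos (by omega)]; exact hjk
    · rintro ⟨hir, hjc⟩
      subst hir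
      have hreven : i % 2 = 0 := by omega
      rw [hc, if_pos (by omega)] at hjc
      rw [hnum, hjc]; ring

-- the x/y accumulator over one row
theorem X_row (w num i r c : Int) (hc0 : 0 ≤ c)
    (hrv : ∀ j, 0 ≤ j → j < w → (rvA w num i j = num ↔ i = r ∧ j = c)) :
    ∀ (m : Nat), (m : Int) ≤ w → ∀ (o : Option (Int × Int)),
      (PySem.List.pyRange 0 (m : Int) 1).foldl (innerX w num i) o
        = if i = r ∧ c < (m : Int) then some (c, i) else o := by
  intro m
  induction m with
  | zero =>
    intro _ o
    rw [PySem.List.pyRange_one_eq_nil (by norm_num), if_neg (by omega)]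
    rfl
  | succ m ih =>
    intro hm o
    have hcast : ((m + 1 : Nat) : Int) = (m : Int) + 1 := by push_cast; ring
    rw [hcast, PySem.List.pyRange_one_succ_right (by positivity), List.foldl_append,
      ih (by omega) o, List.foldl_cons, List.foldl_nil, innerX]
    by_cases hhit : i = r ∧ (m : Int) = c
    · rw [if_pos ((hrv (m : Int) (by positivity) (by omega)).2 ⟨hhit.1, hhit.2⟩),
        if_pos ⟨hhit.1, by omega⟩]
      rw [hhit.2]
    · rw [if_neg (fun h => hhit ((hrv (m : Int) (by positivity) (by omega)).1 h))]
      by_cases hprev : i = r ∧ c < (m : Int)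
      · rw [if_pos hprev, if_pos ⟨hprev.1, by omega⟩]
      · rw [if_neg hprev, if_neg (by rintro ⟨h1, h2⟩; exact hprev ⟨h1, by omega⟩)]

-- the x/y accumulator over the whole board
theorem X_all (w num r c : Int) (hw : 0 < w) (hc0 : 0 ≤ c) (hcw : c < w)
    (hrv : ∀ i, 0 ≤ i → ∀ j, 0 ≤ j → j < w → (rvA w num i j = num ↔ i = r ∧ j = c)) :
    ∀ (M : Nat),
      (PySem.List.pyRange 0 (M : Int) 1).foldl
        (fun o i => (PySem.List.pyRange 0 w 1).foldl (innerX w num i) o) none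
      = if 0 ≤ r ∧ r < (M : Int) then some (c, r) else none := by
  intro M
  induction M with
  | zero =>
    rw [PySem.List.pyRange_one_eq_nil (b := ((0 : Nat) : Int)) (by norm_num), if_neg (by omega)]
    rfl
  | succ M ih =>
    have hcast : ((M + 1 : Nat) : Int) = (M : Int) + 1 := by push_cast; ring
    have hwc : ((w.toNat : Nat) : Int) = w := Int.toNat_of_nonneg hw.le
    rw [hcast, PySem.List.pyRange_one_succ_right (b := (M : Int)) (by positivity), List.foldl_append,
      ih, List.foldl_cons, List.foldl_nil]
    have hcols : PySem.List.pyRange 0 w 1 = PySem.List.pyRange 0 ((w.toNat : Nat) : Int) 1 := by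
      rw [hwc]
    rw [hcols, X_row w num (M : Int) r c hc0 (hrv (M : Int) (by positivity)) w.toNat (by omega)]
    by_cases hhit : (M : Int) = r
    · rw [if_pos ⟨hhit, by omega⟩, if_pos (by constructor <;> omega)]
      rw [hhit]
    · rw [if_neg (fun h => hhit h.1)]
      by_cases hprev : 0 ≤ r ∧ r < (M : Int)
      · rw [if_pos hprev, if_pos ⟨hprev.1, by omega⟩]
      · rw [if_neg hprev, if_neg (by rintro ⟨h1, h2⟩; exact hprev ⟨h1, by omega⟩)]
-- the row built by A's inner loop
def rowF (w num i : Int) (m : Nat) (row : List Int) : List Int :=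
  (PySem.List.pyRange 0 (m : Int) 1).foldl (fun row j => row.set j.toNat (rvA w num i j)) row

theorem rowF_succ (w num i : Int) (m : Nat) (row : List Int) :
    rowF w num i (m + 1) row = (rowF w num i m row).set m (rvA w num i (m : Int)) := by
  rw [rowF, rowF, show ((m + 1 : Nat) : Int) = (m : Int) + 1 by push_cast; ring,
    PySem.List.pyRange_one_succ_right (by positivity), List.foldl_append,
    List.foldl_cons, List.foldl_nil, Int.toNat_natCast]

theorem rowF_length (w num i : Int) (m : Nat) (row : List Int) :
    (rowF w num i m row).length = row.length := by
  induction m with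
  | zero => rw [rowF, PySem.List.pyRange_one_eq_nil (by norm_num)]; rfl
  | succ m ih => rw [rowF_succ, List.length_set, ih]

theorem rowF_get (w num i : Int) (m : Nat) (row : List Int) (t : Nat)
    (ht : t < m) (htl : t < row.length) :
    (rowF w num i m row)[t]? = some (rvA w num i (t : Int)) := by
  induction m with
  | zero => omega
  | succ m ih =>
    rw [rowF_succ]
    by_cases he : t = m
    · subst he
      rw [List.getElem?_set_self (by rw [rowF_length]; exact htl)]
    · rw [List.getElem?_set_ne (by omega), ih (by omega)]

-- A's inner loop only rewrites row i
theorem innerB_fold (w num i : Int) (m : Nat) :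
    ∀ (bd : List (List Int)), i.toNat < bd.length →
      (PySem.List.pyRange 0 (m : Int) 1).foldl (innerB w num i) bd
        = bd.set i.toNat (rowF w num i m (bd[i.toNat]?.getD [])) := by
  induction m with
  | zero =>
    intro bd hlen
    rw [PySem.List.pyRange_one_eq_nil (b := ((0 : Nat) : Int)) (by norm_num), List.foldl_nil,
      rowF, PySem.List.pyRange_one_eq_nil (by norm_num), List.foldl_nil]
    have : bd[i.toNat]?.getD [] = bd[i.toNat] := by simp [List.getElem?_eq_getElem hlen]
    rw [this, List.set_getElem_self]
  | succ m ih =>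
    intro bd hlen
    rw [show ((m + 1 : Nat) : Int) = (m : Int) + 1 by push_cast; ring,
      PySem.List.pyRange_one_succ_right (b := (m : Int)) (by positivity), List.foldl_append,
      ih bd hlen, List.foldl_cons, List.foldl_nil, innerB,
      List.getElem?_set_self (by exact hlen), Option.getD_some, List.set_set,
      Int.toNat_natCast, ← rowF_succ]
-- A's outer loop over the board, stopped after M rows
def outerB (w num : Int) (bd : List (List Int)) (i : Int) : List (List Int) :=
  (PySem.List.pyRange 0 w 1).foldl (innerB w num i) bd

def boardAt (w num H : Int) (M : Nat) : List (List Int) :=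
  (PySem.List.pyRange 0 (M : Int) 1).foldl (outerB w num)
    ((PySem.List.pyRange 0 (H + 1) 1).map (fun _ => List.replicate w.toNat 0))

theorem BD_all (w num H : Int) (hw : 0 < w) :
    ∀ (M : Nat), (M : Int) ≤ H + 1 →
      (boardAt w num H M).length = (H + 1).toNat ∧
      (∀ q : Nat, q < (H + 1).toNat → ((boardAt w num H M)[q]?.getD []).length = w.toNat) ∧
      (∀ i : Int, 0 ≤ i → i < (M : Int) → ∀ t : Nat, t < w.toNat →
        (((boardAt w num H M)[i.toNat]?.getD [])[t]?.getD 0) = rvA w num i (t : Int)) := by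
  intro M
  induction M with
  | zero =>
    intro _
    have hB0 : boardAt w num H 0
        = (PySem.List.pyRange 0 (H + 1) 1).map (fun _ => List.replicate w.toNat 0) := by
      rw [boardAt, PySem.List.pyRange_one_eq_nil (b := ((0 : Nat) : Int)) (by norm_num),
        List.foldl_nil]
    refine ⟨?_, ?_, ?_⟩
    · rw [hB0, List.length_map, PySem.List.length_pyRange_one]; norm_num
    · intro q hq
      rw [hB0]
      have hq' : q < ((PySem.List.pyRange 0 (H + 1) 1).map
          (fun _ => List.replicate w.toNat (0:Int))).length := by
        rw [List.length_map, PySem.List.length_pyRange_one]; omega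
      rw [List.getElem?_eq_getElem hq', Option.getD_some, List.getElem_map,
        List.length_replicate]
    · intro i _ hi2; omega
  | succ M ih =>
    intro hM
    obtain ⟨ihlen, ihrow, ihval⟩ := ih (by omega)
    have hwc : ((w.toNat : Nat) : Int) = w := Int.toNat_of_nonneg hw.le
    have hMlen : (M : Nat) < (boardAt w num H M).length := by rw [ihlen]; omega
    have hstep : boardAt w num H (M + 1)
        = (boardAt w num H M).set M
            (rowF w num (M : Int) w.toNat ((boardAt w num H M)[M]?.getD [])) := by
      rw [boardAt, show ((M + 1 : Nat) : Int) = (M : Int) + 1 by push_cast; ring,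
        PySem.List.pyRange_one_succ_right (b := (M : Int)) (by positivity), List.foldl_append,
        List.foldl_cons, List.foldl_nil, ← boardAt, outerB,
        show PySem.List.pyRange 0 w 1 = PySem.List.pyRange 0 ((w.toNat : Nat) : Int) 1 by
          rw [hwc],
        innerB_fold w num (M : Int) w.toNat _ (by rw [Int.toNat_natCast]; exact hMlen),
        Int.toNat_natCast]
    refine ⟨?_, ?_, ?_⟩
    · rw [hstep, List.length_set, ihlen]
    · intro q hq
      rw [hstep]
      by_cases he : q = M
      · subst he
        rw [List.getElem?_set_self hMlen, Option.getD_some, rowF_length]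
        exact ihrow q hq
      · rw [List.getElem?_set_ne (by omega)]
        exact ihrow q hq
    · intro i hi0 hi2 t ht
      rw [hstep]
      by_cases he : i = (M : Int)
      · subst he
        rw [Int.toNat_natCast, List.getElem?_set_self hMlen, Option.getD_some,
          rowF_get w num (M : Int) w.toNat _ t ht
            (by rw [ihrow M (by omega)]; exact ht), Option.getD_some]
      · have : i.toNat ≠ (M : Nat) := by omega
        rw [List.getElem?_set_ne (by omega)]
        exact ihval i hi0 (by omega) t ht
-- B's per-row column value is A's cell value in column c
theorem vB_eq (w num c i : Int) :
    (if PySem.Int.mod i 2 = 0 then i * w + c + 1 else (i + 1) * w - c) = rvA w num i c := by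
  have h2 : (0:Int) < 2 := by norm_num
  rw [rvA, PySem.Int.mod_eq_emod_of_pos h2, PySem.Int.mod_eq_emod_of_pos h2]
  by_cases hp : (i + 1) % 2 = 0
  · rw [if_pos hp, if_neg (by omega)]
  · rw [if_neg hp, if_pos (by omega)]; ring

-- the degenerate admitted inputs: both loops of A are empty, B's loop is empty too
theorem key0 (n w num : Int) (hle : PySem.Int.floordiv n w + 1 ≤ 0) :
    solution n w num = solution_alt n w num := by
  simp only [solution, solution_alt]
  rw [PySem.List.pyRange_one_eq_nil (a := 0) (b := PySem.Int.floordiv n w + 1) hle]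
  rfl

-- the main case: num occurs on the board
theorem key (n w num : Int) (hw : 1 ≤ w) (h1 : 1 ≤ num)
    (h2 : num ≤ (PySem.Int.floordiv n w + 1) * w) :
    solution n w num = solution_alt n w num := by
  have hw' : (0:Int) < w := hw
  have h2' : (0:Int) < 2 := by norm_num
  set H : Int := PySem.Int.floordiv n w with hH
  set r : Int := PySem.Int.floordiv (num - 1) w with hr
  set k : Int := PySem.Int.mod (num - 1) w with hk
  set c : Int := if PySem.Int.mod r 2 = 0 then k else w - 1 - k with hc
  have hre : r = (num - 1) / w := by rw [hr, PySem.Int.floordiv_eq_ediv_of_pos hw']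
  have hke : k = (num - 1) % w := by rw [hk, PySem.Int.mod_eq_emod_of_pos hw']
  have hnum : num = r * w + k + 1 := by
    have := Int.mul_ediv_add_emod (num - 1) w
    rw [hre, hke]; linarith
  have hk0 : 0 ≤ k := by rw [hke]; exact Int.emod_nonneg _ (by omega)
  have hkw : k < w := by rw [hke]; exact Int.emod_lt_of_pos _ hw'
  have hr0 : 0 ≤ r := by rw [hre]; exact Int.ediv_nonneg (by omega) hw'.le
  have hrH : r < H + 1 := by
    rcases lt_or_ge r (H + 1) with h | h
    · exact h
    · exfalso; have hmul : (H + 1) * w ≤ r * w := mul_le_mul_of_nonneg_right h hw'.le; nlinarith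
  have hH1 : (0:Int) < H + 1 := by omega
  have hc0 : 0 ≤ c := by rw [hc]; split_ifs <;> omega
  have hcw : c < w := by rw [hc]; split_ifs <;> omega
  have hrv : ∀ i, 0 ≤ i → ∀ j, 0 ≤ j → j < w → (rvA w num i j = num ↔ i = r ∧ j = c) :=
    fun i _ j hj hj2 => rvA_eq_num_iff hw' hnum hk0 hkw hc hj hj2
  have hHcast : (((H + 1).toNat : Nat) : Int) = H + 1 := Int.toNat_of_nonneg hH1.le
  -- decompose A's first loop into its two independent accumulators
  have hstep : (fun (st : List (List Int) × Option (Int × Int)) i =>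
        (PySem.List.pyRange 0 w 1).foldl
          (fun (st : List (List Int) × Option (Int × Int)) j =>
            let v : Int :=
              if PySem.Int.mod (i + 1) 2 = 0 then (i + 1) * w - j else i * w + (j + 1)
            let bd := st.1.set i.toNat ((st.1[i.toNat]?.getD []).set j.toNat v)
            let xy := if v = num then some (j, i) else st.2
            (bd, xy))
          st)
      = fun (st : List (List Int) × Option (Int × Int)) i =>
          ((PySem.List.pyRange 0 w 1).foldl (innerB w num i) st.1,
           (PySem.List.pyRange 0 w 1).foldl (innerX w num i) st.2) := by
    funext st i
    obtain ⟨a, b⟩ := st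
    exact PySem.List.foldl_prod_mk (innerB w num i) (innerX w num i) _ a b
  have hpair : (PySem.List.pyRange 0 (H + 1) 1).foldl
      (fun (st : List (List Int) × Option (Int × Int)) i =>
        (PySem.List.pyRange 0 w 1).foldl
          (fun (st : List (List Int) × Option (Int × Int)) j =>
            let v : Int :=
              if PySem.Int.mod (i + 1) 2 = 0 then (i + 1) * w - j else i * w + (j + 1)
            let bd := st.1.set i.toNat ((st.1[i.toNat]?.getD []).set j.toNat v)
            let xy := if v = num then some (j, i) else st.2
            (bd, xy))
          st)
      ((PySem.List.pyRange 0 (H + 1) 1).map (fun _ => List.replicate w.toNat 0), none)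
      = (boardAt w num H (H + 1).toNat, some (c, r)) := by
    rw [hstep, PySem.List.foldl_prod_mk
      (fun bd i => (PySem.List.pyRange 0 w 1).foldl (innerB w num i) bd)
      (fun o i => (PySem.List.pyRange 0 w 1).foldl (innerX w num i) o)]
    rw [Prod.mk.injEq]
    refine ⟨?_, ?_⟩
    · rw [boardAt, hHcast]; rfl
    · rw [show PySem.List.pyRange 0 (H + 1) 1
          = PySem.List.pyRange 0 (((H + 1).toNat : Nat) : Int) 1 by rw [hHcast],
        X_all w num r c hw' hc0 hcw hrv (H + 1).toNat, if_pos ⟨hr0, by omega⟩]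
  obtain ⟨BDlen, BDrow, BDval⟩ := BD_all w num H hw' (H + 1).toNat (by omega)
  simp only [solution, solution_alt]
  rw [← hH, ← hr, ← hk, ← hc, hpair]
  dsimp only
  refine (PySem.List.foldl_congr_mem _ _
      (fun (acc : Int) (i : Int) =>
        if rvA w num i c ≥ num ∧ rvA w num i c ≤ n then acc + 1 else acc) _ ?_).trans
    ((PySem.List.foldl_congr_mem _ _
      (fun (acc : Int) (i : Int) =>
        if rvA w num i c ≥ num ∧ rvA w num i c ≤ n then acc + 1 else acc) _ ?_).symm)
  · intro acc i hi
    rw [PySem.List.mem_pyRange_one] at hi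
    have hval := BDval i hi.1 (by omega) c.toNat (by omega)
    rw [Int.toNat_of_nonneg hc0] at hval
    dsimp only
    rw [hval]
  · intro acc i hi
    rw [PySem.List.mem_pyRange_one] at hi
    dsimp only
    rw [vB_eq w num c i]

-- ===== VERDICT (by name: the statement is the Claim_ definition above) =====
theorem solution_spec : Claim_equal_solution := by
  intro n w num _ hpre
  unfold Pre_solution at hpre
  unfold Spec_solution
  obtain ⟨hw, hle | ⟨hw1, h1, h2⟩⟩ := hpre
  · exact key0 n w num hle
  · exact key n w num hw1 h1 h2
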